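-- pv_equiv track=rewrite | github.com/SherryS997/project-euler | 61. Cyclical figurate numbers.py | is_cyclical
-- ===== SOURCE A (Python) =====
-- def is_cyclical(list):
--     front_set = []
--     back_set = []
--     for x in list:
--         front = int(str(x)[0:2])
--         back = int(str(x)[2:4])
--         front_set.append(front)
--         back_set.append(back)
--     front_set.sort()
--     back_set.sort()
--     if front_set == back_set:
--         return True
--     return False
-- ===== SOURCE B (Python) =====
-- def is_cyclical(list):
--     # Net frequency dict: +1 for each front half, -1 for each back half.
--     # The halves form equal multisets iff every net count is zero.
--     net = {}
--     for x in list: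
--         s = str(x)
--         f = int(s[0:2])
--         b = int(s[2:4])
--         net[f] = net.get(f, 0) + 1
--         net[b] = net.get(b, 0) - 1
--     return all(v == 0 for v in net.values())
-- ===== Notes on version B (the rewrite author's own statement) =====
-- stated objective: alternative
-- what changed: Replaces the two accumulated lists that are sorted and compared with a single net-frequency dictionary (+1 per front half, -1 per back half) checked for all zeros, eliminating the sorting step entirely.
import Mathlib
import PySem

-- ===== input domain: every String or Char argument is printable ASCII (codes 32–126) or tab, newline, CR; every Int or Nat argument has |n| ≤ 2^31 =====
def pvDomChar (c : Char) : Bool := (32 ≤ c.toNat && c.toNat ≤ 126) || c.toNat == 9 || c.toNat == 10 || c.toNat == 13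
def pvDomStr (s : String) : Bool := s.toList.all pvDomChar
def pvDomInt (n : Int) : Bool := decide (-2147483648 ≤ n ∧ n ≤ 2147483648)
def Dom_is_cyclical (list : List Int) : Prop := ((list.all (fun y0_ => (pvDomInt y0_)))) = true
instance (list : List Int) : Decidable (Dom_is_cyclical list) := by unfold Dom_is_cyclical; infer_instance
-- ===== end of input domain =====

-- B replaces A's sort-then-compare of the two half-lists by a net-frequency dictionary checked for all zeros (alternative algorithm, no sort).

-- ===== PORT A =====
-- front = int(str(x)[0:2]); back = int(str(x)[2:4]).  int('') / int('-') raise ValueError in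
-- Python (ofChars? = none); the .getD 0 is never reached on Pre_, which excludes those inputs.
def pvFront (x : Int) : Int :=
  (PySem.Int.ofChars? (PySem.List.slice (PySem.Int.toChars x) (some 0) (some 2))).getD 0

def pvBack (x : Int) : Int :=
  (PySem.Int.ofChars? (PySem.List.slice (PySem.Int.toChars x) (some 2) (some 4))).getD 0

def is_cyclical (list : List Int) : Bool :=
  let sets := list.foldl (fun (st : List Int × List Int) x =>
      (st.1 ++ [pvFront x], st.2 ++ [pvBack x])) ([], [])
  let front_set := PySem.List.sorted sets.1 (fun y => y) false
  let back_set := PySem.List.sorted sets.2 (fun y => y) false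
  if front_set = back_set then true else false

-- ===== PORT B =====
-- one loop iteration of B: net[f] = net.get(f,0)+1; net[b] = net.get(b,0)-1
def pvStep (d : PySem.Dict Int Int) (x : Int) : PySem.Dict Int Int :=
  ((d.modify (pvFront x) 0 (· + 1)).modify (pvBack x) 0 (· - 1))

def is_cyclical_alt (list : List Int) : Bool :=
  let net := list.foldl pvStep PySem.Dict.empty
  net.values.all (fun v => v == 0)

-- ===== PRECONDITION & SPEC =====
-- Pre_ excludes exactly the elements -9 ≤ x ≤ 99, on which Python's int(str(x)[2:4]) = int('')
-- (or int('-')) raises ValueError in A (and in B alike).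
def Pre_is_cyclical (list : List Int) : Prop := ∀ x ∈ list, x ≤ -10 ∨ 100 ≤ x
instance (list : List Int) : Decidable (Pre_is_cyclical list) := by unfold Pre_is_cyclical; infer_instance
def pvWitness_is_cyclical : List Int := [8128, 2882, 8281]

def Spec_is_cyclical (list : List Int) (out : Bool) : Prop := out = is_cyclical_alt list
instance (list : List Int) (out : Bool) : Decidable (Spec_is_cyclical list out) := by unfold Spec_is_cyclical; infer_instance

-- ===== CLAIM (what is proved, stated in full; the proofs are below) =====
def Claim_equal_is_cyclical : Prop := ∀ (list : List Int), Dom_is_cyclical list → Pre_is_cyclical list → Spec_is_cyclical list (is_cyclical list)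

-- ===== LEMMAS AND PROOFS =====

-- A's accumulation loop builds exactly the two mapped lists.
theorem pv_foldA (l : List Int) (a b : List Int) :
    l.foldl (fun (st : List Int × List Int) x => (st.1 ++ [pvFront x], st.2 ++ [pvBack x])) (a, b)
      = (a ++ l.map pvFront, b ++ l.map pvBack) := by
  induction l generalizing a b with
  | nil => simp
  | cons y t ih => simp [ih]

theorem pv_mem_keys_modify (d : PySem.Dict Int Int) (k k' : Int) (d0 : Int) (f : Int → Int) :
    k' ∈ (d.modify k d0 f).keys ↔ k' = k ∨ k' ∈ d.keys := by
  rw [PySem.Dict.keys_modify]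
  exact PySem.Dict.mem_keys_insert d k k' _

theorem pv_nodup_keys_modify (d : PySem.Dict Int Int) (k : Int) (d0 : Int) (f : Int → Int)
    (h : d.keys.Nodup) : (d.modify k d0 f).keys.Nodup := by
  rw [PySem.Dict.keys_modify]
  exact PySem.Dict.nodup_keys_insert d k _ h

-- Net-count invariant of B's loop.
theorem pv_getD_fold (l : List Int) (d : PySem.Dict Int Int) (k : Int) :
    (l.foldl pvStep d).getD k 0
      = d.getD k 0 + ((l.map pvFront).count k : Int) - ((l.map pvBack).count k : Int) := by
  induction l generalizing d with
  | nil => simp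
  | cons y t ih =>
    simp only [List.foldl_cons, ih, pvStep, PySem.Dict.getD_modify, List.map_cons,
      List.count_cons, beq_iff_eq]
    push_cast
    split_ifs <;> subst_vars <;> simp_all <;> omega

theorem pv_mem_keys_fold (l : List Int) (d : PySem.Dict Int Int) (k : Int) :
    k ∈ (l.foldl pvStep d).keys ↔ k ∈ d.keys ∨ k ∈ l.map pvFront ∨ k ∈ l.map pvBack := by
  induction l generalizing d with
  | nil => simp
  | cons y t ih =>
    simp only [List.foldl_cons, ih, pvStep, pv_mem_keys_modify, List.map_cons, List.mem_cons]
    tauto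

theorem pv_nodup_keys_fold (l : List Int) (d : PySem.Dict Int Int) (h : d.keys.Nodup) :
    (l.foldl pvStep d).keys.Nodup := by
  induction l generalizing d with
  | nil => exact h
  | cons y t ih =>
    exact ih _ (pv_nodup_keys_modify _ _ _ _ (pv_nodup_keys_modify _ _ _ _ h))

-- ===== VERDICT (by name: the statement is the Claim_ definition above) =====
theorem is_cyclical_spec : Claim_equal_is_cyclical := by
  intro list _ _
  unfold Spec_is_cyclical is_cyclical is_cyclical_alt
  rw [pv_foldA]
  simp only [List.nil_append]
  set fs := list.map pvFront with hfs
  set bs := list.map pvBack with hbs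
  set net := list.foldl pvStep PySem.Dict.empty with hnet
  have hk : ∀ k : Int, net.getD k 0 = (fs.count k : Int) - (bs.count k : Int) := by
    intro k; rw [hnet, pv_getD_fold]; simp [hfs, hbs]
  have hmem : ∀ k : Int, k ∈ net.keys ↔ k ∈ fs ∨ k ∈ bs := by
    intro k; rw [hnet, pv_mem_keys_fold]; simp [hfs, hbs]
  have hnd : net.keys.Nodup := pv_nodup_keys_fold list PySem.Dict.empty (by simp)
  have main : ((PySem.List.sorted fs (fun y => y) false = PySem.List.sorted bs (fun y => y) false))
      ↔ ∀ k ∈ net.keys, net.getD k 0 = 0 := by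
    rw [PySem.List.sorted_id_eq_sorted_id_iff_perm fs bs, List.perm_iff_count]
    constructor
    · intro h k _
      rw [hk, h k]; omega
    · intro h a
      by_cases ha : a ∈ net.keys
      · have h0 := h a ha; rw [hk] at h0; omega
      · have hnf : a ∉ fs := fun hf => ha ((hmem a).mpr (Or.inl hf))
        have hnb : a ∉ bs := fun hb => ha ((hmem a).mpr (Or.inr hb))
        simp [List.count_eq_zero_of_not_mem hnf, List.count_eq_zero_of_not_mem hnb]
  rw [PySem.Dict.values_eq_map_keys net hnd 0]
  have hX : ((net.keys.map (fun k => net.getD k 0)).all (fun v => v == 0) = true)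
      ↔ ∀ k ∈ net.keys, net.getD k 0 = 0 := by
    simp
  by_cases hall : ∀ k ∈ net.keys, net.getD k 0 = 0
  · rw [if_pos (main.mpr hall)]
    exact (hX.mpr hall).symm
  · rw [if_neg (fun hc => hall (main.mp hc))]
    cases hb : (net.keys.map (fun k => net.getD k 0)).all (fun v => v == 0) with
    | false => rfl
    | true => exact absurd (hX.mp hb) hall
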